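-- pv_equiv track=rewrite | github.com/pypi-data/pypi-mirror-251 | packages/unitgrade/unitgrade-1.0.0.11.tar.gz/unitgrade-1.0.0.11/src/unitgrade/utils.py | rm_progress_bar
-- ===== SOURCE A (Python) =====
-- def rm_progress_bar(txt):
--     # More robust version. Apparently length of bar can depend on various factors, so check for order of symbols.
--     nlines = []
--     for l in txt.splitlines():
--         pct = l.find("%")
--         ql = False
--         if pct > 0:
--             i = l.find("|", pct + 1)
--             if i > 0 and l.find("|", i + 1) > 0:
--                 ql = True
--         if not ql:
--             nlines.append(l)
--     return "\n".join(nlines)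
-- ===== SOURCE B (Python) =====
-- def rm_progress_bar(txt):
--     # One left-to-right state machine per line instead of repeated str.find scans.
--     nlines = []
--     for l in txt.splitlines():
--         state = 0
--         if l and l[0] != '%':
--             for c in l[1:]:
--                 if state == 0:
--                     if c == '%':
--                         state = 1
--                 elif state == 1:
--                     if c == '|':
--                         state = 2
--                 else:
--                     if c == '|':
--                         state = 3
--                         break
--         if state != 3:
--             nlines.append(l)
--     return "\n".join(nlines)
-- ===== Notes on version B (the rewrite author's own statement) =====
-- stated objective: alternative
-- what changed: Replaced A's per-line triple str.find logic (find '%', then find '|' after it twice) with a single left-to-right state-machine pass over each line's characters.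
import Mathlib
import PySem

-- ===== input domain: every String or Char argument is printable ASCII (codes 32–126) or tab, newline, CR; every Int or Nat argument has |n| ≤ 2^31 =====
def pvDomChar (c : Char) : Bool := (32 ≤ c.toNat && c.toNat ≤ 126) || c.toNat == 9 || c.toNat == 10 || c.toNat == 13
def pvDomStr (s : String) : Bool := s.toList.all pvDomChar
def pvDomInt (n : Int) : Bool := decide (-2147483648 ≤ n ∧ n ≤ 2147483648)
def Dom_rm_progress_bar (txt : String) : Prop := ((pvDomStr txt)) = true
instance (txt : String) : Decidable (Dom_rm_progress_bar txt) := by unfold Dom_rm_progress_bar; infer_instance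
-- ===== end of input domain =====

-- B replaces A's repeated str.find scans per line with a single left-to-right
-- state-machine pass per line (objective: alternative, same cost).

-- ===== PORT A =====
-- per-line "is this a progress-bar line" test of A (pct/i finds, ql flag)
def pvQl (cs : List Char) : Bool :=
  let pct := PySem.Chars.find cs ['%']
  if pct > 0 then
    let i := PySem.Chars.findFrom cs ['|'] (pct + 1)
    if i > 0 ∧ PySem.Chars.findFrom cs ['|'] (i + 1) > 0 then true else false
  else false

def rm_progress_bar (txt : String) : String :=
  let nlines := (PySem.Str.splitlines txt).foldl
    (fun nlines l => if pvQl l.toList = false then nlines ++ [l] else nlines) []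
  PySem.Str.join "\n" nlines

-- ===== PORT B =====
-- the state machine of Source B: 0 = waiting for '%', 1 = waiting for first '|',
-- 2 = waiting for second '|', 3 = matched (break)
def pvScan (st : Nat) : List Char → Nat
  | [] => st
  | c :: cs =>
    if st = 0 then pvScan (if c = '%' then 1 else 0) cs
    else if st = 1 then pvScan (if c = '|' then 2 else 1) cs
    else if c = '|' then 3 else pvScan st cs

-- final state for a line: run the machine on l[1:] only if l is nonempty and l[0] != '%'
def pvState (cs : List Char) : Nat :=
  match cs with
  | [] => 0
  | c :: rest => if c ≠ '%' then pvScan 0 rest else 0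

def rm_progress_bar_alt (txt : String) : String :=
  PySem.Str.join "\n" ((PySem.Str.splitlines txt).foldl
    (fun nlines l => if pvState l.toList ≠ 3 then nlines ++ [l] else nlines) [])

-- ===== PRECONDITION & SPEC =====
def Spec_rm_progress_bar (txt : String) (out : String) : Prop := out = rm_progress_bar_alt txt
instance (txt : String) (out : String) : Decidable (Spec_rm_progress_bar txt out) := by unfold Spec_rm_progress_bar; infer_instance

-- ===== CLAIM (what is proved, stated in full; the proofs are below) =====
def Claim_equal_rm_progress_bar : Prop := ∀ (txt : String), Dom_rm_progress_bar txt → Spec_rm_progress_bar txt (rm_progress_bar txt)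

-- ===== LEMMAS AND PROOFS =====

-- common characterisation: first char is not '%' and some '%' is followed by two '|'s
def pvSpecP (cs : List Char) : Prop :=
  cs[0]? ≠ some '%' ∧ ∃ n, cs[n]? = some '%' ∧ 2 ≤ (cs.drop (n+1)).count '|'

lemma pv_sing_prefix {a : Char} {t : List Char} : [a] <+: t ↔ t[0]? = some a := by
  cases t with
  | nil => simp
  | cons b t => simp [List.cons_prefix_cons, eq_comm]

lemma pv_count_drop_mono (s : List Char) (c : Char) {a b : Nat} (h : a ≤ b) :
    (s.drop b).count c ≤ (s.drop a).count c := by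
  have : s.drop b = (s.drop a).drop (b - a) := by
    rw [List.drop_drop]; congr 1; omega
  rw [this]
  exact (List.drop_sublist _ _).count_le c

lemma pv_count_drop_succ {s : List Char} {c : Char} {m : Nat} (h : s[m]? = some c) :
    (s.drop m).count c = (s.drop (m+1)).count c + 1 := by
  have hm : m < s.length := by
    by_contra hm
    simp [List.getElem?_eq_none (by omega : s.length ≤ m)] at h
  have hv : s[m] = c := by
    have := List.getElem?_eq_getElem hm
    rw [this] at h; exact Option.some.inj h
  rw [List.drop_eq_getElem_cons hm, hv]
  simp

lemma pv_scan2 (cs : List Char) : pvScan 2 cs = 3 ↔ 1 ≤ cs.count '|' := by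
  induction cs with
  | nil => simp [pvScan]
  | cons c cs ih =>
    by_cases hc : c = '|' <;> simp [pvScan, hc, ih]

lemma pv_scan1 (cs : List Char) : pvScan 1 cs = 3 ↔ 2 ≤ cs.count '|' := by
  induction cs with
  | nil => simp [pvScan]
  | cons c cs ih =>
    by_cases hc : c = '|' <;> simp [pvScan, hc, ih, pv_scan2]

lemma pv_scan0 (cs : List Char) :
    pvScan 0 cs = 3 ↔ ∃ n, cs[n]? = some '%' ∧ 2 ≤ (cs.drop (n+1)).count '|' := by
  induction cs with
  | nil => simp [pvScan]
  | cons c cs ih =>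
    by_cases hc : c = '%'
    · rw [show pvScan 0 (c :: cs) = pvScan 1 cs by simp [pvScan, hc], pv_scan1]
      constructor
      · intro h; exact ⟨0, by simp [hc], by simpa using h⟩
      · rintro ⟨n, hn, hcnt⟩
        cases n with
        | zero => simpa using hcnt
        | succ k =>
          have := pv_count_drop_mono cs '|' (Nat.zero_le (k+1))
          simp only [List.drop_zero] at this
          have hcnt' : 2 ≤ (cs.drop (k+1)).count '|' := by
            simpa [List.getElem?_cons_succ] using hcnt
          omega
    · rw [show pvScan 0 (c :: cs) = pvScan 0 cs by simp [pvScan, hc], ih]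
      constructor
      · rintro ⟨k, hk, hcnt⟩
        exact ⟨k+1, by simpa using hk, by simpa using hcnt⟩
      · rintro ⟨n, hn, hcnt⟩
        cases n with
        | zero => exact absurd (by simpa using hn) hc
        | succ k => exact ⟨k, by simpa using hn, by simpa using hcnt⟩

lemma pv_state_iff (cs : List Char) : pvState cs = 3 ↔ pvSpecP cs := by
  cases cs with
  | nil => simp [pvState, pvSpecP]
  | cons c rest =>
    by_cases hc : c = '%'
    · simp [pvState, pvSpecP, hc]
    · simp only [pvState, if_pos hc, pvSpecP]
      rw [pv_scan0]
      constructor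
      · rintro ⟨k, hk, hcnt⟩
        exact ⟨by simpa using hc, k+1, by simpa using hk, by simpa using hcnt⟩
      · rintro ⟨-, n, hn, hcnt⟩
        cases n with
        | zero => exact absurd (by simpa using hn) hc
        | succ k => exact ⟨k, by simpa using hn, by simpa using hcnt⟩

lemma pv_prefix_drop {a : Char} {cs : List Char} {m : Nat} :
    [a] <+: cs.drop m ↔ cs[m]? = some a := by
  rw [pv_sing_prefix, List.getElem?_drop]
  norm_num

lemma pv_first_le {cs : List Char} {n : Nat}
    (hnn : 0 ≤ PySem.Chars.find cs ['%']) (hn : cs[n]? = some '%') :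
    (PySem.Chars.find cs ['%']).toNat ≤ n := by
  by_contra hlt
  exact ((PySem.Chars.find_spec hnn).2 n (by omega)) (pv_prefix_drop.2 hn)

lemma pv_ql_iff (cs : List Char) : pvQl cs = true ↔ pvSpecP cs := by
  unfold pvQl pvSpecP
  by_cases h1 : PySem.Chars.find cs ['%'] > 0
  · simp only [if_pos h1]
    have hnn : 0 ≤ PySem.Chars.find cs ['%'] := le_of_lt h1
    obtain ⟨hpre, hmin⟩ := PySem.Chars.find_spec hnn
    set p := (PySem.Chars.find cs ['%']).toNat with hp
    have hpv : cs[p]? = some '%' := pv_prefix_drop.1 hpre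
    have hplen : p < cs.length := by
      by_contra hc
      simp [List.getElem?_eq_none (by omega : cs.length ≤ p)] at hpv
    have hp0 : 0 < p := by omega
    have hhead : cs[0]? ≠ some '%' := fun h => hmin 0 hp0 (pv_prefix_drop.2 h)
    have hcast : PySem.Chars.find cs ['%'] + 1 = ((p + 1 : Nat) : Int) := by
      push_cast; omega
    have hk1 : p + 1 ≤ cs.length := hplen
    rw [hcast]
    by_cases h2 : PySem.Chars.findFrom cs ['|'] ((p + 1 : Nat) : Int) = -1
    · rw [h2]
      have hno : ¬ ['|'] <:+: cs.drop (p + 1) :=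
        (PySem.Chars.findFrom_natCast_eq_neg_one_iff cs ['|'] (p+1) hk1).1 h2
      have hcnt0 : (cs.drop (p + 1)).count '|' = 0 :=
        List.count_eq_zero.2 (fun hmem => hno ((List.singleton_infix_iff _ _).2 hmem))
      constructor
      · intro h; simp at h
      · rintro ⟨-, n, hn, hcnt⟩
        have hpn : p ≤ n := pv_first_le hnn hn
        have := pv_count_drop_mono cs '|' (by omega : p + 1 ≤ n + 1)
        omega
    · obtain ⟨hki, hpre2, hmin2⟩ :=
        PySem.Chars.findFrom_natCast_spec cs ['|'] (p+1) hk1 h2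
      set i := (PySem.Chars.findFrom cs ['|'] ((p + 1 : Nat) : Int)).toNat with hi
      have hiv : cs[i]? = some '|' := pv_prefix_drop.1 hpre2
      have hilen : i < cs.length := by
        by_contra hc
        simp [List.getElem?_eq_none (by omega : cs.length ≤ i)] at hiv
      have hip : p + 1 ≤ i := by omega
      have hieq : PySem.Chars.findFrom cs ['|'] ((p + 1 : Nat) : Int) = (i : Int) := by
        omega
      rw [hieq]
      have hcast2 : (i : Int) + 1 = ((i + 1 : Nat) : Int) := by push_cast; ring
      rw [hcast2]
      have hk2 : i + 1 ≤ cs.length := hilen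
      have hcd : (cs.drop i).count '|' = (cs.drop (i+1)).count '|' + 1 :=
        pv_count_drop_succ hiv
      by_cases h3 : PySem.Chars.findFrom cs ['|'] ((i + 1 : Nat) : Int) = -1
      · rw [h3]
        have hno : ¬ ['|'] <:+: cs.drop (i + 1) :=
          (PySem.Chars.findFrom_natCast_eq_neg_one_iff cs ['|'] (i+1) hk2).1 h3
        have hcnt0 : (cs.drop (i + 1)).count '|' = 0 :=
          List.count_eq_zero.2 (fun hmem => hno ((List.singleton_infix_iff _ _).2 hmem))
        -- no '|' strictly between p and i either, so drop (p+1) holds exactly one '|'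
        have hsplit : cs.drop (p+1) = (cs.drop (p+1)).take (i-(p+1)) ++ cs.drop i := by
          conv_lhs => rw [← List.take_append_drop (i-(p+1)) (cs.drop (p+1))]
          rw [List.drop_drop]
          congr 2
          omega
        have htk0 : ((cs.drop (p+1)).take (i-(p+1))).count '|' = 0 := by
          refine List.count_eq_zero.2 (fun hmem => ?_)
          obtain ⟨m, hm, hval⟩ := List.getElem_of_mem hmem
          have hmlt : m < i - (p+1) := by
            have := List.length_take_le (i-(p+1)) (cs.drop (p+1))
            omega
          have hval' : cs[(p+1)+m]? = some '|' := by
            rw [List.getElem_take] at hval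
            have : (cs.drop (p+1))[m]? = some '|' := by
              rw [List.getElem?_eq_getElem (by
                simp only [List.length_drop]
                omega : m < (cs.drop (p+1)).length)]
              simp [hval]
            rwa [List.getElem?_drop] at this
          exact (hmin2 ((p+1)+m) (by omega) (by omega)) (pv_prefix_drop.2 hval')
        have hone : (cs.drop (p+1)).count '|' = 1 := by
          rw [hsplit, List.count_append]
          omega
        constructor
        · intro h; simp at h
        · rintro ⟨-, n, hn, hcnt⟩
          have hpn : p ≤ n := pv_first_le hnn hn
          have := pv_count_drop_mono cs '|' (by omega : p + 1 ≤ n + 1)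
          omega
      · -- both pipes found: A's test passes, and the count is at least 2
        obtain ⟨hkj, hpre3, -⟩ :=
          PySem.Chars.findFrom_natCast_spec cs ['|'] (i+1) hk2 h3
        set j := (PySem.Chars.findFrom cs ['|'] ((i + 1 : Nat) : Int)).toNat with hj
        have hjv : cs[j]? = some '|' := pv_prefix_drop.1 hpre3
        have hij : i + 1 ≤ j := by omega
        have hjeq : PySem.Chars.findFrom cs ['|'] ((i + 1 : Nat) : Int) = (j : Int) := by
          omega
        have hcdj : (cs.drop j).count '|' = (cs.drop (j+1)).count '|' + 1 :=
          pv_count_drop_succ hjv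
        have hmono1 : (cs.drop i).count '|' ≤ (cs.drop (p+1)).count '|' :=
          pv_count_drop_mono cs '|' hip
        have hmono2 : (cs.drop j).count '|' ≤ (cs.drop (i+1)).count '|' :=
          pv_count_drop_mono cs '|' hij
        have hcnt2 : 2 ≤ (cs.drop (p+1)).count '|' := by omega
        simp only [hjeq]
        constructor
        · intro _
          exact ⟨hhead, p, hpv, hcnt2⟩
        · intro _
          rw [if_pos ⟨by omega, by omega⟩]
  · simp only [if_neg h1]
    constructor
    · intro h; exact absurd h (by simp)
    · rintro ⟨hh, n, hn, -⟩
      have hmem : '%' ∈ cs := List.mem_of_getElem? hn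
      have hne : PySem.Chars.find cs ['%'] ≠ -1 := by
        intro heq
        exact ((PySem.Chars.find_eq_neg_one_iff cs ['%']).1 heq)
          ((List.singleton_infix_iff _ _).2 hmem)
      have hnn : 0 ≤ PySem.Chars.find cs ['%'] := by
        have := PySem.Chars.neg_one_le_find cs ['%']
        omega
      have h0 : PySem.Chars.find cs ['%'] = 0 := by omega
      have : cs[0]? = some '%' := by
        have := (PySem.Chars.find_spec hnn).1
        rw [h0] at this
        exact pv_prefix_drop.1 this
      exact absurd this hh

lemma pv_keep (cs : List Char) : (pvQl cs = false) ↔ (pvState cs ≠ 3) := by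
  constructor
  · intro h h3
    have := (pv_ql_iff cs).2 ((pv_state_iff cs).1 h3)
    simp [this] at h
  · intro h
    by_cases hq : pvQl cs = true
    · exact absurd ((pv_state_iff cs).2 ((pv_ql_iff cs).1 hq)) h
    · simpa using hq

-- ===== VERDICT (by name: the statement is the Claim_ definition above) =====
theorem rm_progress_bar_spec : Claim_equal_rm_progress_bar := by
  intro txt _
  unfold Spec_rm_progress_bar rm_progress_bar rm_progress_bar_alt
  have hfun : (fun (nlines : List String) (l : String) =>
        if pvQl l.toList = false then nlines ++ [l] else nlines)
      = (fun (nlines : List String) (l : String) =>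
        if pvState l.toList ≠ 3 then nlines ++ [l] else nlines) := by
    funext nlines l
    exact if_congr (pv_keep l.toList) rfl rfl
  rw [hfun]
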